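-- pv_equiv track=rewrite | github.com/alchemorphosis/beachdog | modules/analyze.py | puzzleLayout
-- ===== SOURCE A (Python) =====
-- def puzzleLayout(grid:list[str]) -> tuple[list[list[int]], dict[int, str], dict[int, str]]:
--     """Returns the numbering grid and across and down dictionaries."""
--     across, down = {}, {}
--     rows, cols = len(grid), len(grid[0])
--     numbering = [[0 if grid[x][y] != '.' else -1 for y in range(cols)] for x in range(rows)]
--
--     clueNumber = 1
--
--     for x in range(rows):
--         for y in range(cols):
--             if grid[x][y] == '.':
--                 continue
--
--             # Check if a clue number should be assigned
--             isNewAcross = (y == 0 or grid[x][y - 1] == '.')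
--             isNewDown = (x == 0 or grid[x - 1][y] == '.')
--
--             if isNewAcross or isNewDown:
--                 numbering[x][y] = clueNumber
--
--                 # Add across word if new across clue
--                 if isNewAcross:
--                     across[clueNumber] = fillWordAcross(grid, x, y)
--
--                 # Add down word if new down clue
--                 if isNewDown:
--                     down[clueNumber] = fillWordDown(grid, x, y)
--
--                 clueNumber += 1
--
--     return numbering, across, down
--
-- def fillWordAcross(grid:list[str], x:int, y:int) -> str:
--     """Returns the across word at position [x, y,] in the grid"""
--     line = grid[x][y:]
--     if '.' in line:
--         word = line[:line.find('.')].upper()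
--     else:
--         word = line.upper()
--     return(word)
--
-- def fillWordDown(grid:list[str], x:int, y:int) -> str:
--     """Returns the down word at position [x, y,] in the grid"""
--     line = ''
--     for row in range(x, len(grid)):
--         line += grid[row][y]
--     if '.' in line:
--         word = line[:line.find('.')].upper()
--     else:
--         word = line.upper()
--     return(word)
-- ===== SOURCE B (Python) =====
-- def _runs(chars):
--     """Maximal non-'.' segments of a character list, as {start_index: UPPERCASED text}."""
--     runs = {}
--     i, n = 0, len(chars)
--     while i < n:
--         if chars[i] == '.':
--             i += 1
--         else:
--             j = i
--             while j < n and chars[j] != '.':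
--                 j += 1
--             runs[i] = ''.join(chars[i:j]).upper()
--             i = j
--     return runs
--
-- def puzzleLayout(grid):
--     rows, cols = len(grid), len(grid[0])
--     # index every word run once, by its starting cell
--     row_runs = [_runs(list(row)) for row in grid]
--     col_runs = [_runs([grid[x][y] for x in range(rows)]) for y in range(cols)]
--     numbering = [[-1 if grid[x][y] == '.' else 0 for y in range(cols)] for x in range(rows)]
--     across, down = {}, {}
--     num = 1
--     for x in range(rows):
--         for y in range(cols):
--             a = y in row_runs[x]
--             d = x in col_runs[y]
--             if a or d:
--                 numbering[x][y] = num
--                 if a: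
--                     across[num] = row_runs[x][y]
--                 if d:
--                     down[num] = col_runs[y][x]
--                 num += 1
--     return numbering, across, down
-- ===== Notes on version B (the rewrite author's own statement) =====
-- stated objective: alternative
-- what changed: B first splits every row and every column once into maximal non-'.' runs indexed by their start cell, then numbers the grid in one reading-order pass that only looks runs up, replacing A's per-cell neighbour tests plus fillWordAcross/fillWordDown re-scans.
import Mathlib
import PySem

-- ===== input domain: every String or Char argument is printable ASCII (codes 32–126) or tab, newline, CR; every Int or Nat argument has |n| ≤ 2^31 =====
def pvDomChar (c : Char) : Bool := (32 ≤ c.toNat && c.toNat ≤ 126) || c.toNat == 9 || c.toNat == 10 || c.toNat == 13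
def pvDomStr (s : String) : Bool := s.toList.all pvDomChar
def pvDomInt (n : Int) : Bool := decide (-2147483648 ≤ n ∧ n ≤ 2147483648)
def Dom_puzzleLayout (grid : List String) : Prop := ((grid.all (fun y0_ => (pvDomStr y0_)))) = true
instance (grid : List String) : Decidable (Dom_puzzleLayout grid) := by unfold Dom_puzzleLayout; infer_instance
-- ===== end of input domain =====

-- B re-implements A's crossword numbering by pre-indexing the word runs of every row and
-- column once and then numbering in a single reading-order pass (objective: alternative).

-- helpers shared by both ports: grid[x][y] (total stand-in via defaults; every access either
-- Python makes is in range under Pre_), len(grid[0]), and the shaping of the returned tuple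
def pvCell (grid : List String) (x y : Nat) : Char :=
  ((grid.getD x "").toList).getD y ' '

def pvCols (grid : List String) : Nat := (grid.headD "").toList.length

def pvOut (st : List (List Int) × PySem.Dict Int String × PySem.Dict Int String × Int) :
    List (List Int) × (List (Int × String)) × (List (Int × String)) :=
  (st.1, st.2.1.items, st.2.2.1.items)

-- ===== PORT A =====
def pvFillWordAcross (grid : List String) (x y : Nat) : String :=
  -- line = grid[x][y:], written out at each use
  if PySem.Chars.isIn ['.'] (((grid.getD x "").toList).drop y) then
    String.ofList (PySem.Chars.upper ((((grid.getD x "").toList).drop y).take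
      (PySem.Chars.find (((grid.getD x "").toList).drop y) ['.']).toNat))
  else
    String.ofList (PySem.Chars.upper (((grid.getD x "").toList).drop y))

-- line = the concatenation loop "for row in range(x, len(grid)): line += grid[row][y]"
def pvDownLine (grid : List String) (x y : Nat) : List Char :=
  ((List.range grid.length).drop x).foldl (fun acc r => acc ++ [pvCell grid r y]) []

def pvFillWordDown (grid : List String) (x y : Nat) : String :=
  if PySem.Chars.isIn ['.'] (pvDownLine grid x y) then
    String.ofList (PySem.Chars.upper ((pvDownLine grid x y).take
      (PySem.Chars.find (pvDownLine grid x y) ['.']).toNat))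
  else
    String.ofList (PySem.Chars.upper (pvDownLine grid x y))

-- numbering = [[0 if grid[x][y] != '.' else -1 for y in range(cols)] for x in range(rows)]
def pvNumA (grid : List String) : List (List Int) :=
  (List.range grid.length).map (fun x =>
    (List.range (pvCols grid)).map (fun y => if pvCell grid x y ≠ '.' then (0 : Int) else -1))

-- the body of A's loop at cell (x, y): neighbour tests, then fillWord re-scans
def pvBodyA (grid : List String) (x : Nat)
    (st : List (List Int) × PySem.Dict Int String × PySem.Dict Int String × Int) (y : Nat) :
    List (List Int) × PySem.Dict Int String × PySem.Dict Int String × Int :=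
  if pvCell grid x y = '.' then st
  else if (y = 0 ∨ pvCell grid x (y - 1) = '.') ∨ (x = 0 ∨ pvCell grid (x - 1) y = '.') then
    (st.1.modify x (fun row => row.set y st.2.2.2),
     if y = 0 ∨ pvCell grid x (y - 1) = '.' then st.2.1.insert st.2.2.2 (pvFillWordAcross grid x y) else st.2.1,
     if x = 0 ∨ pvCell grid (x - 1) y = '.' then st.2.2.1.insert st.2.2.2 (pvFillWordDown grid x y) else st.2.2.1,
     st.2.2.2 + 1)
  else st

def pvStepA (grid : List String)
    (st : List (List Int) × PySem.Dict Int String × PySem.Dict Int String × Int) (x : Nat) :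
    List (List Int) × PySem.Dict Int String × PySem.Dict Int String × Int :=
  (List.range (pvCols grid)).foldl (pvBodyA grid x) st

def puzzleLayout (grid : List String) : List (List Int) × (List (Int × String)) × (List (Int × String)) :=
  pvOut ((List.range grid.length).foldl (pvStepA grid)
    (pvNumA grid, PySem.Dict.empty, PySem.Dict.empty, 1))

-- ===== PORT B =====
-- the inner while of B's _runs: collect the maximal non-'.' prefix, return (run, rest)
def pvScan : List Char → List Char × List Char
  | [] => ([], [])
  | c :: t => if c = '.' then ([], c :: t) else
      let p := pvScan t
      (c :: p.1, p.2)

theorem pvScan_snd_length_le : ∀ (s : List Char), (pvScan s).2.length ≤ s.length := by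
  intro s
  induction s with
  | nil => simp [pvScan]
  | cons c t ih =>
    by_cases h : c = '.'
    · simp [pvScan, h]
    · simp [pvScan, h]; omega

-- the outer while of B's _runs: runs is the dict built so far, i the current index
def pvRunsFrom (runs : PySem.Dict Nat String) (i : Nat) (s : List Char) : PySem.Dict Nat String :=
  match s with
  | [] => runs
  | c :: t =>
    if c = '.' then pvRunsFrom runs (i + 1) t
    else
      let p := pvScan (c :: t)
      pvRunsFrom (runs.insert i (String.ofList (PySem.Chars.upper p.1))) (i + p.1.length) p.2
  termination_by s.length
  decreasing_by
  · simp
  · simp only [pvScan, if_neg (by assumption)]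
    have := pvScan_snd_length_le t
    simp; omega

def pvRuns (s : List Char) : PySem.Dict Nat String := pvRunsFrom PySem.Dict.empty 0 s

-- row_runs = [_runs(list(row)) for row in grid];  col_runs = [_runs(column y) for y in range(cols)]
def pvRowRuns (grid : List String) : List (PySem.Dict Nat String) :=
  grid.map (fun row => pvRuns row.toList)

def pvColRuns (grid : List String) : List (PySem.Dict Nat String) :=
  (List.range (pvCols grid)).map (fun y =>
    pvRuns ((List.range grid.length).map (fun x => pvCell grid x y)))

def pvNumB (grid : List String) : List (List Int) :=
  (List.range grid.length).map (fun x =>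
    (List.range (pvCols grid)).map (fun y => if pvCell grid x y = '.' then (-1 : Int) else 0))

-- the body of B's numbering loop at cell (x, y): pure lookups in the run indexes
def pvBodyB (grid : List String) (x : Nat)
    (st : List (List Int) × PySem.Dict Int String × PySem.Dict Int String × Int) (y : Nat) :
    List (List Int) × PySem.Dict Int String × PySem.Dict Int String × Int :=
  if ((pvRowRuns grid).getD x PySem.Dict.empty).contains y
      || ((pvColRuns grid).getD y PySem.Dict.empty).contains x then
    (st.1.modify x (fun row => row.set y st.2.2.2),
     if ((pvRowRuns grid).getD x PySem.Dict.empty).contains y then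
       st.2.1.insert st.2.2.2 (((pvRowRuns grid).getD x PySem.Dict.empty).getD y "") else st.2.1,
     if ((pvColRuns grid).getD y PySem.Dict.empty).contains x then
       st.2.2.1.insert st.2.2.2 (((pvColRuns grid).getD y PySem.Dict.empty).getD x "") else st.2.2.1,
     st.2.2.2 + 1)
  else st

def pvStepB (grid : List String)
    (st : List (List Int) × PySem.Dict Int String × PySem.Dict Int String × Int) (x : Nat) :
    List (List Int) × PySem.Dict Int String × PySem.Dict Int String × Int :=
  (List.range (pvCols grid)).foldl (pvBodyB grid x) st

def puzzleLayout_alt (grid : List String) : List (List Int) × (List (Int × String)) × (List (Int × String)) :=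
  pvOut ((List.range grid.length).foldl (pvStepB grid)
    (pvNumB grid, PySem.Dict.empty, PySem.Dict.empty, 1))

-- ===== PRECONDITION & SPEC =====
-- A raises IndexError on the empty grid and whenever some row is shorter than the first row
-- (row indexing in the numbering comprehension / fillWordDown); Pre_ excludes exactly those.
def Pre_puzzleLayout (grid : List String) : Prop :=
  grid ≠ [] ∧ ∀ s ∈ grid, (grid.headD "").toList.length ≤ s.toList.length
instance (grid : List String) : Decidable (Pre_puzzleLayout grid) := by unfold Pre_puzzleLayout; infer_instance
def pvWitness_puzzleLayout : List String := ["AB.", "C.D", ".EF"]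

def Spec_puzzleLayout (grid : List String) (out : List (List Int) × (List (Int × String)) × (List (Int × String))) : Prop := out = puzzleLayout_alt grid
instance (grid : List String) (out : List (List Int) × (List (Int × String)) × (List (Int × String))) : Decidable (Spec_puzzleLayout grid out) := by unfold Spec_puzzleLayout; infer_instance

-- ===== CLAIM (what is proved, stated in full; the proofs are below) =====
def Claim_equal_puzzleLayout : Prop := ∀ (grid : List String), Dom_puzzleLayout grid → Pre_puzzleLayout grid → Spec_puzzleLayout grid (puzzleLayout grid)

-- ===== LEMMAS AND PROOFS =====

-- "cell i of s starts a word run": s[i] exists, is not '.', and i is 0 or preceded by '.'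
def pvIsStartB (s : List Char) (i : Nat) : Bool :=
  decide (i < s.length) && decide (s.getD i ' ' ≠ '.') &&
    (decide (i = 0) || decide (s.getD (i - 1) ' ' = '.'))

theorem pvScan_eq (s : List Char) :
    pvScan s = (s.takeWhile (fun ch => decide (ch ≠ '.')), s.dropWhile (fun ch => decide (ch ≠ '.'))) := by
  induction s with
  | nil => simp [pvScan]
  | cons c t ih => by_cases h : c = '.' <;> simp [pvScan, h, ih]

theorem pvDropWhile_head {p : Char → Bool} :
    ∀ (l : List Char) (a : Char) (t : List Char), l.dropWhile p = a :: t → p a = false := by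
  intro l
  induction l with
  | nil => intro a t h; simp [List.dropWhile] at h
  | cons c cs ih =>
    intro a t h
    by_cases hc : p c
    · rw [List.dropWhile_cons_of_pos hc] at h; exact ih a t h
    · rw [List.dropWhile_cons_of_neg hc] at h
      cases h; simpa using hc

-- queries strictly below the scan position are never touched
theorem pvRunsFrom_get?_lt : ∀ (n : Nat) (s : List Char), s.length ≤ n →
    ∀ (runs : PySem.Dict Nat String) (i q : Nat), q < i →
    (pvRunsFrom runs i s).get? q = runs.get? q := by
  intro n
  induction n with
  | zero =>
    intro s hs runs i q _
    have : s = [] := List.eq_nil_of_length_eq_zero (by omega)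
    subst this
    simp [pvRunsFrom]
  | succ n ih =>
    intro s hs runs i q hq
    cases s with
    | nil => simp [pvRunsFrom]
    | cons c t =>
      have hst : t.length ≤ n := by simp at hs; omega
      by_cases hc : c = '.'
      · subst hc
        rw [pvRunsFrom, if_pos rfl]
        exact ih t hst runs (i + 1) q (by omega)
      · rw [pvRunsFrom, if_neg hc]
        simp only [pvScan_eq]
        have hrwD : List.dropWhile (fun ch => decide (ch ≠ '.')) (c :: t)
            = List.dropWhile (fun ch => decide (ch ≠ '.')) t := by simp [hc]
        rw [hrwD]
        have hdl : (List.dropWhile (fun ch => decide (ch ≠ '.')) t).length ≤ t.length := by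
          simpa [pvScan_eq] using pvScan_snd_length_le t
        rw [ih (t.dropWhile (fun ch => decide (ch ≠ '.'))) (by omega) _ _ q (by omega),
          PySem.Dict.get?_insert]
        simp [show ¬ q = i from by omega]

-- the main characterisation: the dict built from position i maps i+j to the run starting at j
theorem pvRunsFrom_get?_ge : ∀ (n : Nat) (s : List Char), s.length ≤ n →
    ∀ (runs : PySem.Dict Nat String) (i j : Nat),
    (∀ k, runs.contains k = true → k < i) →
    (pvRunsFrom runs i s).get? (i + j) =
      if pvIsStartB s j then
        some (String.ofList (PySem.Chars.upper ((s.drop j).takeWhile (fun ch => decide (ch ≠ '.')))))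
      else runs.get? (i + j) := by
  intro n
  induction n with
  | zero =>
    intro s hs runs i j _
    have : s = [] := List.eq_nil_of_length_eq_zero (by omega)
    subst this
    simp [pvRunsFrom, pvIsStartB]
  | succ n ih =>
    intro s hs runs i j hk
    cases s with
    | nil => simp [pvRunsFrom, pvIsStartB]
    | cons c t =>
      have hst : t.length ≤ n := by simp at hs; omega
      by_cases hc : c = '.'
      · subst hc
        rw [pvRunsFrom, if_pos rfl]
        cases j with
        | zero =>
          rw [pvRunsFrom_get?_lt n t hst runs (i + 1) (i + 0) (by omega)]
          simp [pvIsStartB]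
        | succ j' =>
          rw [show i + (j' + 1) = (i + 1) + j' from by omega,
            ih t hst runs (i + 1) j' (fun k h => by have := hk k h; omega)]
          have hsh : pvIsStartB ('.' :: t) (j' + 1) = pvIsStartB t j' := by
            unfold pvIsStartB
            cases j' with
            | zero => simp
            | succ m => simp
          rw [hsh, List.drop_succ_cons, show (i + 1) + j' = i + (j' + 1) from by omega]
      · rw [pvRunsFrom, if_neg hc]
        simp only [pvScan_eq]
        have hrwT : List.takeWhile (fun ch => decide (ch ≠ '.')) (c :: t)
            = c :: List.takeWhile (fun ch => decide (ch ≠ '.')) t := by simp [hc]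
        have hrwD : List.dropWhile (fun ch => decide (ch ≠ '.')) (c :: t)
            = List.dropWhile (fun ch => decide (ch ≠ '.')) t := by simp [hc]
        rw [hrwT, hrwD]
        simp only [List.length_cons]
        obtain ⟨tw, htw⟩ : ∃ tw, t.takeWhile (fun ch => decide (ch ≠ '.')) = tw := ⟨_, rfl⟩
        obtain ⟨rest, hrest⟩ : ∃ r, t.dropWhile (fun ch => decide (ch ≠ '.')) = r := ⟨_, rfl⟩
        rw [htw, hrest]
        have hcons : List.takeWhile (fun ch => decide (ch ≠ '.')) (c :: t) = c :: tw := by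
          rw [hrwT, htw]
        have hsplit : tw ++ rest = t := by rw [← htw, ← hrest]; exact List.takeWhile_append_dropWhile
        have hlenrest : t.length = tw.length + rest.length := by rw [← hsplit]; simp
        have htwmem : ∀ a ∈ tw, a ≠ '.' := by
          intro a hamem
          rw [← htw] at hamem
          simpa using List.mem_takeWhile_imp hamem
        have htwall : ∀ m, m < tw.length → t.getD m ' ' ≠ '.' := by
          intro m hm
          have h1 : t.getD m ' ' = tw.getD m ' ' := by
            rw [← hsplit, List.getD_append _ _ _ _ hm]
          rw [h1, List.getD_eq_getElem _ _ hm]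
          exact htwmem _ (List.getElem_mem _)
        have hrestD : ∀ m, rest.getD m ' ' = t.getD (tw.length + m) ' ' := by
          intro m
          conv_rhs => rw [← hsplit]
          rw [List.getD_append_right _ _ _ _ (by omega)]
          congr 1
          omega
        have hrestdrop : ∀ m, rest.drop m = t.drop (tw.length + m) := by
          intro m
          conv_rhs => rw [← hsplit]
          have hnil : tw.drop (tw.length + m) = [] := List.drop_eq_nil_of_le (by omega)
          rw [List.drop_append, hnil]
          simp
        have hkeys : ∀ k, (runs.insert i (String.ofList (PySem.Chars.upper (c :: tw)))).contains k = true →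
            k < i + (tw.length + 1) := by
          intro k h
          rw [PySem.Dict.contains_insert] at h
          rcases Bool.or_eq_true_iff.mp h with h | h
          · have : k = i := by simpa using h
            omega
          · have := hk k h
            omega
        rcases Nat.lt_or_ge j (tw.length + 1) with hj | hj
        · cases j with
          | zero =>
            rw [pvRunsFrom_get?_lt n rest (by omega) _ (i + (tw.length + 1)) (i + 0) (by omega),
              PySem.Dict.get?_insert]
            have hs0 : pvIsStartB (c :: t) 0 = true := by
              unfold pvIsStartB
              simp [hc]
            rw [hs0, List.drop_zero, hcons]
            simp
          | succ j' =>
            rw [pvRunsFrom_get?_lt n rest (by omega) _ (i + (tw.length + 1)) (i + (j' + 1)) (by omega),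
              PySem.Dict.get?_insert]
            have hnotst : pvIsStartB (c :: t) (j' + 1) = false := by
              have hprev : ¬ ((c :: t).getD (j' + 1 - 1) ' ' = '.') := by
                show ¬ ((c :: t).getD j' ' ' = '.')
                cases j' with
                | zero => simpa using hc
                | succ m =>
                  rw [List.getD_cons_succ]
                  exact htwall m (by omega)
              unfold pvIsStartB
              rw [decide_eq_false hprev, decide_eq_false (show ¬ (j' + 1 = 0) by omega)]
              simp
            rw [hnotst]
            simp
        · obtain ⟨m, rfl⟩ : ∃ m, j = (tw.length + 1) + m := ⟨j - (tw.length + 1), by omega⟩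
          rw [show i + (tw.length + 1 + m) = (i + (tw.length + 1)) + m from by omega,
            ih rest (by omega) _ (i + (tw.length + 1)) m hkeys]
          have hdropEq : rest.drop m = (c :: t).drop (tw.length + 1 + m) := by
            rw [hrestdrop m, show tw.length + 1 + m = (tw.length + m) + 1 from by omega,
              List.drop_succ_cons]
          have hstEq : pvIsStartB (c :: t) (tw.length + 1 + m) = pvIsStartB rest m := by
            cases m with
            | zero =>
              cases hr : rest with
              | nil =>
                have hL : t.length = tw.length := by rw [hr] at hlenrest; simpa using hlenrest
                unfold pvIsStartB
                rw [decide_eq_false (show ¬ (tw.length + 1 + 0 < (c :: t).length) by simp [hL]),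
                  decide_eq_false (show ¬ ((0 : Nat) < ([] : List Char).length) by simp)]
                simp
              | cons a r' =>
                have ha : a = '.' := by
                  have := pvDropWhile_head t a r' (by rw [hrest, hr])
                  simpa using this
                have h2 : (c :: t).getD (tw.length + 1 + 0) ' ' = '.' := by
                  have h3 : rest.getD 0 ' ' = t.getD tw.length ' ' := by simpa using hrestD 0
                  rw [show tw.length + 1 + 0 = tw.length + 1 from by omega, List.getD_cons_succ,
                    ← h3, hr]
                  simp [ha]
                unfold pvIsStartB
                rw [decide_eq_false (show ¬ ((c :: t).getD (tw.length + 1 + 0) ' ' ≠ '.') from by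
                      rw [h2]; simp),
                  decide_eq_false (show ¬ ((a :: r').getD 0 ' ' ≠ '.') from by simp [ha])]
                simp
            | succ m' =>
              unfold pvIsStartB
              have e1 : decide (tw.length + 1 + (m' + 1) < (c :: t).length) =
                  decide (m' + 1 < rest.length) :=
                decide_eq_decide.mpr (by simp; omega)
              have e2 : (c :: t).getD (tw.length + 1 + (m' + 1)) ' ' = rest.getD (m' + 1) ' ' := by
                rw [hrestD (m' + 1), show tw.length + 1 + (m' + 1) = (tw.length + (m' + 1)) + 1 from by omega,
                  List.getD_cons_succ]
              have e3 : (c :: t).getD (tw.length + 1 + (m' + 1) - 1) ' ' = rest.getD (m' + 1 - 1) ' ' := by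
                rw [show m' + 1 - 1 = m' from rfl, hrestD m',
                  show tw.length + 1 + (m' + 1) - 1 = (tw.length + m') + 1 from by omega,
                  List.getD_cons_succ]
              rw [e1, e2, e3]
              simp
          rw [hstEq, hdropEq]
          by_cases hb : pvIsStartB rest m = true
          · rw [if_pos hb, if_pos hb]
          · rw [if_neg hb, if_neg hb, PySem.Dict.get?_insert]
            simp [show (i + (tw.length + 1)) + m = i + (tw.length + 1 + m) from by omega]

-- get?/contains/getD of pvRuns, phrased for the main pass
theorem pvRuns_get? (s : List Char) (q : Nat) :
    (pvRuns s).get? q =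
      if pvIsStartB s q then
        some (String.ofList (PySem.Chars.upper ((s.drop q).takeWhile (fun ch => decide (ch ≠ '.')))))
      else none := by
  have h := pvRunsFrom_get?_ge s.length s le_rfl PySem.Dict.empty 0 q
    (by intro k hk; simp [PySem.Dict.contains_empty] at hk)
  simpa [pvRuns, PySem.Dict.get?_empty] using h

theorem pvRuns_contains (s : List Char) (q : Nat) :
    (pvRuns s).contains q = pvIsStartB s q := by
  rw [PySem.Dict.contains_eq_isSome_get?, pvRuns_get?]
  by_cases h : pvIsStartB s q <;> simp [h]

theorem pvRuns_getD (s : List Char) (q : Nat) (h : pvIsStartB s q = true) :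
    (pvRuns s).getD q "" = String.ofList (PySem.Chars.upper ((s.drop q).takeWhile (fun ch => decide (ch ≠ '.')))) := by
  rw [PySem.Dict.getD_eq_get?_getD, pvRuns_get?, if_pos h]
  rfl

-- str.find of '.' lands at the end of the leading non-'.' segment
theorem pvFindGo_dot : ∀ (cs : List Char) (k : Nat), '.' ∈ cs →
    PySem.Chars.find.go ['.'] cs k = ((k : Int) + ((cs.takeWhile (fun ch => decide (ch ≠ '.'))).length : Int)) := by
  intro cs
  induction cs with
  | nil => intro k h; simp at h
  | cons c t ih =>
    intro k h
    by_cases hc : c = '.'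
    · subst hc
      simp [PySem.Chars.find.go, List.isPrefixOf]
    · have ht : '.' ∈ t := by
        rcases List.mem_cons.mp h with h' | h'
        · exact absurd h'.symm hc
        · exact h'
      rw [show PySem.Chars.find.go ['.'] (c :: t) k = PySem.Chars.find.go ['.'] t (k + 1) by
        simp [PySem.Chars.find.go, List.isPrefixOf, (show ('.' == c) = false by simp [Ne.symm hc])]]
      rw [ih (k + 1) ht,
        show List.takeWhile (fun ch => decide (ch ≠ '.')) (c :: t)
            = c :: List.takeWhile (fun ch => decide (ch ≠ '.')) t from by simp [hc],
        List.length_cons]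
      push_cast
      ring

theorem pvFindGo_no_dot : ∀ (cs : List Char) (k : Nat), '.' ∉ cs →
    PySem.Chars.find.go ['.'] cs k = -1 := by
  intro cs
  induction cs with
  | nil => intro k _; simp [PySem.Chars.find.go]
  | cons c t ih =>
    intro k h
    have hc : c ≠ '.' := fun hc => h (by simp [hc])
    rw [show PySem.Chars.find.go ['.'] (c :: t) k = PySem.Chars.find.go ['.'] t (k + 1) by
      simp [PySem.Chars.find.go, List.isPrefixOf, (show ('.' == c) = false by simp [Ne.symm hc])]]
    exact ih (k + 1) (fun h' => h (by simp [h']))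

-- the '.'-trim both fillWord helpers perform is takeWhile (· ≠ '.')
theorem pvTrim (cs : List Char) :
    (if PySem.Chars.isIn ['.'] cs then cs.take (PySem.Chars.find cs ['.']).toNat else cs) =
      cs.takeWhile (fun ch => decide (ch ≠ '.')) := by
  by_cases h : '.' ∈ cs
  · have hf : PySem.Chars.find cs ['.'] = (((cs.takeWhile (fun ch => decide (ch ≠ '.'))).length : Nat) : Int) := by
      simpa [PySem.Chars.find] using pvFindGo_dot cs 0 h
    rw [if_pos (by simp [PySem.Chars.isIn, hf]), hf, Int.toNat_natCast]
    exact (List.prefix_iff_eq_take.mp (List.takeWhile_prefix _)).symm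
  · have hf : PySem.Chars.find cs ['.'] = -1 := by
      simpa [PySem.Chars.find] using pvFindGo_no_dot cs 0 h
    rw [if_neg (by simp [PySem.Chars.isIn, hf])]
    exact (List.takeWhile_eq_self_iff.mpr (fun a ha => by
      have : a ≠ '.' := fun e => h (e ▸ ha)
      simpa using this)).symm

theorem pvFillAcross_eq (grid : List String) (x y : Nat) :
    pvFillWordAcross grid x y =
      String.ofList (PySem.Chars.upper ((((grid.getD x "").toList).drop y).takeWhile (fun ch => decide (ch ≠ '.')))) := by
  unfold pvFillWordAcross
  have h := pvTrim (((grid.getD x "").toList).drop y)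
  split_ifs with hin
  · rw [if_pos hin] at h; rw [h]
  · rw [if_neg hin] at h
    conv_lhs => rw [h]

theorem pvDownLine_eq (grid : List String) (x y : Nat) :
    pvDownLine grid x y = ((List.range grid.length).map (fun r => pvCell grid r y)).drop x := by
  unfold pvDownLine
  rw [PySem.List.foldl_append_singleton_eq_map]
  simp [List.map_drop]

theorem pvFillDown_eq (grid : List String) (x y : Nat) :
    pvFillWordDown grid x y =
      String.ofList (PySem.Chars.upper ((((List.range grid.length).map (fun r => pvCell grid r y)).drop x).takeWhile (fun ch => decide (ch ≠ '.')))) := by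
  unfold pvFillWordDown
  rw [pvDownLine_eq]
  have h := pvTrim (((List.range grid.length).map (fun r => pvCell grid r y)).drop x)
  split_ifs with hin
  · rw [if_pos hin] at h; rw [h]
  · rw [if_neg hin] at h
    conv_lhs => rw [h]

-- looking the precomputed indexes up
theorem pvRowRuns_getD (grid : List String) (x : Nat) (hx : x < grid.length) :
    (pvRowRuns grid).getD x PySem.Dict.empty = pvRuns ((grid.getD x "").toList) := by
  unfold pvRowRuns
  rw [List.getD_eq_getElem _ _ (by simpa using hx), List.getElem_map, List.getD_eq_getElem _ _ hx]

theorem pvColRuns_getD (grid : List String) (y : Nat) (hy : y < pvCols grid) :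
    (pvColRuns grid).getD y PySem.Dict.empty
      = pvRuns ((List.range grid.length).map (fun x => pvCell grid x y)) := by
  unfold pvColRuns
  rw [List.getD_eq_getElem _ _ (by simpa using hy), List.getElem_map, List.getElem_range]

theorem pvCol_getD (grid : List String) (y x : Nat) (hx : x < grid.length) :
    ((List.range grid.length).map (fun r => pvCell grid r y)).getD x ' ' = pvCell grid x y := by
  rw [List.getD_eq_getElem _ _ (by simpa using hx), List.getElem_map, List.getElem_range]

-- the heart of the equivalence: at every in-range cell the two loop bodies agree
theorem pvBody_eq (grid : List String)
    (hlen : ∀ s ∈ grid, pvCols grid ≤ s.toList.length)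
    (x y : Nat) (hx : x < grid.length) (hy : y < pvCols grid)
    (st : List (List Int) × PySem.Dict Int String × PySem.Dict Int String × Int) :
    pvBodyA grid x st y = pvBodyB grid x st y := by
  have hrowmem : grid.getD x "" ∈ grid := by
    rw [List.getD_eq_getElem _ _ hx]; exact List.getElem_mem _
  have hylen : y < ((grid.getD x "").toList).length := lt_of_lt_of_le hy (hlen _ hrowmem)
  have hcollen : ((List.range grid.length).map (fun r => pvCell grid r y)).length = grid.length := by simp
  have ha : ((pvRowRuns grid).getD x PySem.Dict.empty).contains y
      = (decide (pvCell grid x y ≠ '.') && (decide (y = 0) || decide (pvCell grid x (y - 1) = '.'))) := by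
    rw [pvRowRuns_getD grid x hx, pvRuns_contains]
    unfold pvIsStartB
    rw [show (decide (y < ((grid.getD x "").toList).length)) = true from by simpa using hylen,
      Bool.true_and]
    rfl
  have hd : ((pvColRuns grid).getD y PySem.Dict.empty).contains x
      = (decide (pvCell grid x y ≠ '.') && (decide (x = 0) || decide (pvCell grid (x - 1) y = '.'))) := by
    rw [pvColRuns_getD grid y hy, pvRuns_contains]
    unfold pvIsStartB
    rw [pvCol_getD grid y x hx, pvCol_getD grid y (x - 1) (by omega),
      show (decide (x < ((List.range grid.length).map (fun r => pvCell grid r y)).length)) = true from by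
        simp [hx],
      Bool.true_and]
  by_cases hdot : pvCell grid x y = '.'
  · have ha0 : ((pvRowRuns grid).getD x PySem.Dict.empty).contains y = false := by
      rw [ha]; simp [hdot]
    have hd0 : ((pvColRuns grid).getD y PySem.Dict.empty).contains x = false := by
      rw [hd]; simp [hdot]
    unfold pvBodyA pvBodyB
    rw [if_pos hdot, ha0, hd0]
    simp
  · have hwa : (y = 0 ∨ pvCell grid x (y - 1) = '.') →
        ((pvRowRuns grid).getD x PySem.Dict.empty).getD y "" = pvFillWordAcross grid x y := by
      intro hA
      have hstart : pvIsStartB ((grid.getD x "").toList) y = true := by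
        unfold pvIsStartB
        rw [decide_eq_true hylen,
          decide_eq_true (show ((grid.getD x "").toList).getD y ' ' ≠ '.' from hdot)]
        rcases hA with h3 | h3
        · rw [decide_eq_true h3]; simp
        · rw [decide_eq_true (show ((grid.getD x "").toList).getD (y - 1) ' ' = '.' from h3)]; simp
      rw [pvRowRuns_getD grid x hx, pvRuns_getD _ _ hstart, pvFillAcross_eq]
    have hwd : (x = 0 ∨ pvCell grid (x - 1) y = '.') →
        ((pvColRuns grid).getD y PySem.Dict.empty).getD x "" = pvFillWordDown grid x y := by
      intro hD
      have hstart : pvIsStartB ((List.range grid.length).map (fun r => pvCell grid r y)) x = true := by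
        unfold pvIsStartB
        rw [decide_eq_true (show x < ((List.range grid.length).map (fun r => pvCell grid r y)).length
              from by omega),
          decide_eq_true (show ((List.range grid.length).map (fun r => pvCell grid r y)).getD x ' ' ≠ '.'
              from by rw [pvCol_getD grid y x hx]; exact hdot)]
        rcases hD with h4 | h4
        · rw [decide_eq_true h4]; simp
        · rw [decide_eq_true
              (show ((List.range grid.length).map (fun r => pvCell grid r y)).getD (x - 1) ' ' = '.'
                from by rw [pvCol_getD grid y (x - 1) (by omega)]; exact h4)]
          simp
      rw [pvColRuns_getD grid y hy, pvRuns_getD _ _ hstart, pvFillDown_eq]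
    unfold pvBodyA pvBodyB
    rw [if_neg hdot]
    by_cases hA : (y = 0 ∨ pvCell grid x (y - 1) = '.')
    · have ha1 : ((pvRowRuns grid).getD x PySem.Dict.empty).contains y = true := by
        rw [ha]
        rcases hA with h3 | h3
        · subst h3; simp [hdot]
        · simp [hdot, h3]
      by_cases hD : (x = 0 ∨ pvCell grid (x - 1) y = '.')
      · have hd1 : ((pvColRuns grid).getD y PySem.Dict.empty).contains x = true := by
          rw [hd]
          rcases hD with h4 | h4
          · subst h4; simp [hdot]
          · simp [hdot, h4]
        rw [if_pos (Or.inl hA), if_pos hA, if_pos hD, ha1, hd1, hwa hA, hwd hD]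
        simp
      · have hd0 : ((pvColRuns grid).getD y PySem.Dict.empty).contains x = false := by
          obtain ⟨h4a, h4b⟩ := not_or.mp hD
          rw [hd]; simp [h4a, h4b]
        rw [if_pos (Or.inl hA), if_pos hA, if_neg hD, ha1, hd0, hwa hA]
        simp
    · have ha0 : ((pvRowRuns grid).getD x PySem.Dict.empty).contains y = false := by
        obtain ⟨h3a, h3b⟩ := not_or.mp hA
        rw [ha]; simp [h3a, h3b]
      by_cases hD : (x = 0 ∨ pvCell grid (x - 1) y = '.')
      · have hd1 : ((pvColRuns grid).getD y PySem.Dict.empty).contains x = true := by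
          rw [hd]
          rcases hD with h4 | h4
          · subst h4; simp [hdot]
          · simp [hdot, h4]
        rw [if_pos (Or.inr hD), if_neg hA, if_pos hD, ha0, hd1, hwd hD]
        simp
      · have hd0 : ((pvColRuns grid).getD y PySem.Dict.empty).contains x = false := by
          obtain ⟨h4a, h4b⟩ := not_or.mp hD
          rw [hd]; simp [h4a, h4b]
        rw [if_neg (show ¬ ((y = 0 ∨ pvCell grid x (y - 1) = '.') ∨ (x = 0 ∨ pvCell grid (x - 1) y = '.'))
              from fun hor => hor.elim hA hD),
          ha0, hd0]
        simp

-- ===== VERDICT (by name: the statement is the Claim_ definition above) =====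
theorem puzzleLayout_spec : Claim_equal_puzzleLayout := by
  intro grid _dom hpre
  obtain ⟨hne, hlen⟩ := hpre
  unfold Spec_puzzleLayout puzzleLayout puzzleLayout_alt
  have hnum : pvNumA grid = pvNumB grid := by
    unfold pvNumA pvNumB
    apply List.map_congr_left
    intro x _
    apply List.map_congr_left
    intro y _
    by_cases h : pvCell grid x y = '.' <;> simp [h]
  have hfold : (List.range grid.length).foldl (pvStepA grid)
        (pvNumB grid, PySem.Dict.empty, PySem.Dict.empty, 1)
      = (List.range grid.length).foldl (pvStepB grid)
        (pvNumB grid, PySem.Dict.empty, PySem.Dict.empty, 1) := by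
    apply PySem.List.foldl_congr_mem
    intro acc x hxm
    unfold pvStepA pvStepB
    apply PySem.List.foldl_congr_mem
    intro st y hym
    exact pvBody_eq grid (fun s hs => hlen s hs) x y (List.mem_range.mp hxm) (List.mem_range.mp hym) st
  rw [hnum, hfold]
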